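-- pv_equiv track=rewrite | github.com/candle-org/candle | src/candle/_backends/npu/creation.py | _triu_indices_shape
-- ===== SOURCE A (Python) =====
-- def _triu_indices_shape(row, col, offset):
--     row = int(row)
--     col = int(col)
--     offset = int(offset)
--     count = 0
--     for r in range(max(row, 0)):
--         min_c = max(0, r + offset)
--         if min_c < col:
--             count += col - min_c
--     return (2, count)
-- ===== SOURCE B (Python) =====
-- def _triu_indices_shape(row, col, offset):
--     # Closed-form count of upper-triangular indices (O(1) arithmetic instead of a loop over rows).
--     row = int(row)
--     col = int(col)
--     offset = int(offset)
--     R = max(row, 0)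
--     # rows whose first kept column is 0 (r + offset <= 0): each contributes col full columns
--     n_full = max(0, min(R, 1 - offset))
--     base = n_full * col if col > 0 else 0
--     # rows with 1 <= r + offset: r in [a, b) contribute (col - offset - r) each
--     a = max(0, 1 - offset)
--     b = min(R, col - offset)
--     if b > a:
--         m = col - offset
--         tri = _tri(m - a) - _tri(m - b)
--     else:
--         tri = 0
--     return (2, base + tri)
--
--
-- def _tri(n):
--     return n * (n + 1) // 2
-- ===== Notes on version B (the rewrite author's own statement) =====
-- stated objective: faster
-- what changed: Replaced the per-row loop with a closed-form count: full rows counted by a clamped multiplication and the triangular tail by an arithmetic-series formula n*(n+1)//2.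
import Mathlib
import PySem

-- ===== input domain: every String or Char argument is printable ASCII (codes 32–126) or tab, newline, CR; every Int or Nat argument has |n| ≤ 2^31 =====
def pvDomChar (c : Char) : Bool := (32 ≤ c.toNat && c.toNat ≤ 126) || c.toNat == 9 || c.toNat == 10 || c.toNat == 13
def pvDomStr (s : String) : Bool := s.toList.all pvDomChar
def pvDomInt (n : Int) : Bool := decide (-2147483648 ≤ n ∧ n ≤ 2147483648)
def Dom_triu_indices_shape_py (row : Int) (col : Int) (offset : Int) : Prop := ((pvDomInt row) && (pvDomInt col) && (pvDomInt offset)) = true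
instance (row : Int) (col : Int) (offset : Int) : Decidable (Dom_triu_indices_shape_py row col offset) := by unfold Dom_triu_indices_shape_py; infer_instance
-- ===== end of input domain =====

-- B replaces A's O(row) loop by a closed-form arithmetic-series count (O(1)); total, exact equivalence.

-- ===== PORT A =====
-- literal transliteration: the int() coercions are identity on Int inputs
def triu_indices_shape_py (row : Int) (col : Int) (offset : Int) : List Int :=
  let count : Int :=
    (PySem.List.pyRange 0 (max row 0) 1).foldl
      (fun count r =>
        let min_c := max 0 (r + offset)
        if min_c < col then count + (col - min_c) else count) 0
  [2, count]

-- ===== PORT B =====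
-- helper _tri from Source B: n*(n+1)//2
def pvTri (n : Int) : Int := PySem.Int.floordiv (n * (n + 1)) 2

def triu_indices_shape_py_alt (row : Int) (col : Int) (offset : Int) : List Int :=
  let R := max row 0
  let n_full := max 0 (min R (1 - offset))
  let base := if 0 < col then n_full * col else 0
  let a := max 0 (1 - offset)
  let b := min R (col - offset)
  let tri :=
    if a < b then
      let m := col - offset
      pvTri (m - a) - pvTri (m - b)
    else 0
  [2, base + tri]

-- ===== PRECONDITION & SPEC =====
def Spec_triu_indices_shape_py (row : Int) (col : Int) (offset : Int) (out : List Int) : Prop := out = triu_indices_shape_py_alt row col offset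
instance (row : Int) (col : Int) (offset : Int) (out : List Int) : Decidable (Spec_triu_indices_shape_py row col offset out) := by unfold Spec_triu_indices_shape_py; infer_instance

-- ===== CLAIM (what is proved, stated in full; the proofs are below) =====
def Claim_equal_triu_indices_shape_py : Prop := ∀ (row : Int) (col : Int) (offset : Int), Dom_triu_indices_shape_py row col offset → Spec_triu_indices_shape_py row col offset (triu_indices_shape_py row col offset)

-- ===== LEMMAS AND PROOFS =====

-- proof-side closed-form count, matching B's body with R abstracted
def pvClosed (R : Int) (col : Int) (offset : Int) : Int :=
  (if 0 < col then (max 0 (min R (1 - offset))) * col else 0) +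
  (if max 0 (1 - offset) < min R (col - offset) then
     pvTri (col - offset - max 0 (1 - offset)) - pvTri (col - offset - min R (col - offset))
   else 0)

lemma pvTri_two_mul (n : Int) : 2 * pvTri n = n * (n + 1) := by
  have hdvd : (2 : Int) ∣ n * (n + 1) := (Int.even_mul_succ_self n).two_dvd
  unfold pvTri
  rw [PySem.Int.floordiv_eq_ediv_of_pos (by norm_num)]
  exact Int.mul_ediv_cancel' hdvd

lemma pvTri_sub (k : Int) : pvTri k - pvTri (k - 1) = k := by
  have h1 := pvTri_two_mul k
  have h2 := pvTri_two_mul (k - 1)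
  have : 2 * (pvTri k - pvTri (k - 1)) = 2 * k := by linear_combination h1 - h2
  omega

lemma pvClosed_zero (col offset : Int) : pvClosed 0 col offset = 0 := by
  unfold pvClosed
  have h1 : max (0:Int) (min 0 (1 - offset)) = 0 := by omega
  have h2 : ¬ (max (0:Int) (1 - offset) < min 0 (col - offset)) := by omega
  rw [h1, if_neg h2]
  split_ifs <;> ring

lemma pvClosed_step (N col offset : Int) (hN : 0 ≤ N) :
    pvClosed (N + 1) col offset
      = pvClosed N col offset + (if max 0 (N + offset) < col then col - max 0 (N + offset) else 0) := by
  unfold pvClosed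
  by_cases hlow : N + offset ≤ 0
  · -- row N still starts at column 0
    have hm : max (0:Int) (N + offset) = 0 := by omega
    have hn1 : max (0:Int) (min (N + 1) (1 - offset)) = max 0 (min N (1 - offset)) + 1 := by omega
    have ht1 : ¬ (max (0:Int) (1 - offset) < min (N + 1) (col - offset)) := by omega
    have ht0 : ¬ (max (0:Int) (1 - offset) < min N (col - offset)) := by omega
    rw [hm, hn1, if_neg ht1, if_neg ht0]
    split_ifs <;> ring
  · -- row N starts at column N + offset ≥ 1
    have hm : max (0:Int) (N + offset) = N + offset := by omega
    have hn1 : max (0:Int) (min (N + 1) (1 - offset)) = max 0 (min N (1 - offset)) := by omega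
    rw [hm, hn1]
    by_cases hc : N + offset < col
    · -- contributing row: series gains the term col - (N + offset)
      have hb1 : min (N + 1) (col - offset) = N + 1 := by omega
      have hb0 : min N (col - offset) = N := by omega
      have ha1 : max (0:Int) (1 - offset) < N + 1 := by omega
      rw [hb1, hb0, if_pos ha1, if_pos hc]
      by_cases ha0 : max (0:Int) (1 - offset) < N
      · rw [if_pos ha0]
        have := pvTri_sub (col - offset - N)
        have hk : col - offset - (N + 1) = (col - offset - N) - 1 := by ring
        rw [hk]
        split_ifs <;> linarith [this]
      · -- a = N: old series empty
        have haN : max (0:Int) (1 - offset) = N := by omega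
        rw [if_neg ha0, haN]
        have := pvTri_sub (col - offset - N)
        have hk : col - offset - (N + 1) = (col - offset - N) - 1 := by ring
        rw [hk]
        split_ifs <;> linarith [this]
    · -- exhausted: b capped at col - offset, nothing added
      have hb : min (N + 1) (col - offset) = min N (col - offset) := by omega
      rw [hb, if_neg hc]
      split_ifs <;> ring

lemma loop_eq (col offset : Int) (N : Nat) :
    (PySem.List.pyRange 0 (N : Int) 1).foldl
      (fun count r =>
        let min_c := max 0 (r + offset)
        if min_c < col then count + (col - min_c) else count) 0
      = pvClosed (N : Int) col offset := by
  induction N with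
  | zero => simp [PySem.List.pyRange_one_eq_nil, pvClosed_zero]
  | succ n ih =>
      have hsplit : PySem.List.pyRange 0 ((n : Int) + 1) 1
          = PySem.List.pyRange 0 (n : Int) 1 ++ [(n : Int)] :=
        PySem.List.pyRange_one_succ_right (by exact_mod_cast Nat.zero_le n)
      push_cast
      rw [hsplit, List.foldl_append, ih, pvClosed_step (n : Int) col offset (by positivity)]
      simp only [List.foldl_cons, List.foldl_nil]
      split_ifs <;> ring

-- ===== VERDICT (by name: the statement is the Claim_ definition above) =====
theorem triu_indices_shape_py_spec : Claim_equal_triu_indices_shape_py := by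
  intro row col offset _
  unfold Spec_triu_indices_shape_py triu_indices_shape_py triu_indices_shape_py_alt
  have hR : max row 0 = ((max row 0).toNat : Int) := by omega
  rw [hR, loop_eq col offset (max row 0).toNat]
  unfold pvClosed
  rw [← hR]
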